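-- pv_equiv track=rewrite | github.com/farzana039/Daily-Coding- | Assigning works/Incomplete assigning Works.py | distribute_tasks
-- ===== SOURCE A (Python) =====
-- def distribute_tasks(arr, k):
--     #  Find all remaining tasks
--     all_tasks = set(range(1, k + 1)) # all tasks are in a set
--     completed_tasks = set(arr) # completed tasks are in this set
--     remaining_tasks = sorted(all_tasks - completed_tasks) # remaining tasks are calculated by substracting all taks and completed tasks
--     #Distribute tasks alternately between Tanya and Manya
--     tanya_tasks = []
--     manya_tasks = []
--     for i, task in enumerate(remaining_tasks): #enumerate allows you to iterate over a sequence
--         if i % 2 == 0: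
--             tanya_tasks.append(task)  # Tanya takes the 1st, 3rd, 5th...
--         else:
--             manya_tasks.append(task)  # Manya takes the 2nd, 4th, 6th...
--     return [tanya_tasks, manya_tasks]
-- ===== SOURCE B (Python) =====
-- def distribute_tasks(arr, k):
--     completed = set(arr)
--     tanya_tasks = []
--     manya_tasks = []
--     kept = 0
--     for i in range(1, k + 1):
--         if i not in completed:
--             if kept % 2 == 0:
--                 tanya_tasks.append(i)
--             else:
--                 manya_tasks.append(i)
--             kept += 1
--     return [tanya_tasks, manya_tasks]
-- ===== Notes on version B (the rewrite author's own statement) =====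
-- stated objective: simpler
-- what changed: B makes one pass over range(1, k+1) appending uncompleted tasks alternately via a kept-counter, instead of building the full {1..k} set, a set difference and sorted().
import Mathlib
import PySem

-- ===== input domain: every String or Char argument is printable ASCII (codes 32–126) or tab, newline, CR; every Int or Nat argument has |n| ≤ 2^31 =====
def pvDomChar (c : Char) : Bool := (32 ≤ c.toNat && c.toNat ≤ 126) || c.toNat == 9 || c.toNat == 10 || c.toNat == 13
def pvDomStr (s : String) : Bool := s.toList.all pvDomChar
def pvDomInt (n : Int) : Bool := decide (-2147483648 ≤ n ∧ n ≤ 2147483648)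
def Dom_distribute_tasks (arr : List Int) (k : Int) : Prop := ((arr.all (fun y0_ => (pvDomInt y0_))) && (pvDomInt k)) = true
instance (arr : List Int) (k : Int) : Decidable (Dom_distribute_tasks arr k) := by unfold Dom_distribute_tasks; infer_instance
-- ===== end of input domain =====

-- B replaces A's {1..k}-set construction, set difference and sorted() by a single pass over
-- range(1, k+1) with a kept-counter driving the alternation (objective: simpler).

-- ===== PORT A =====
def distribute_tasks (arr : List Int) (k : Int) : List (List Int) :=
  let all_tasks : PySem.Set Int := PySem.Set.ofList (PySem.List.pyRange 1 (k + 1))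
  let completed_tasks : PySem.Set Int := PySem.Set.ofList arr
  let remaining_tasks := PySem.List.sorted (PySem.Set.diff all_tasks completed_tasks) (fun x => x) false
  let r := (PySem.List.enumerate remaining_tasks).foldl
    (fun (p : List Int × List Int) (it : Int × Int) =>
      if PySem.Int.mod it.1 2 == 0 then (p.1 ++ [it.2], p.2) else (p.1, p.2 ++ [it.2]))
    ([], [])
  [r.1, r.2]

-- ===== PORT B =====
def distribute_tasks_alt (arr : List Int) (k : Int) : List (List Int) :=
  let completed : PySem.Set Int := PySem.Set.ofList arr
  let s := (PySem.List.pyRange 1 (k + 1)).foldl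
    (fun (st : List Int × List Int × Int) i =>
      if !(PySem.Set.contains completed i) then
        if PySem.Int.mod st.2.2 2 == 0 then (st.1 ++ [i], st.2.1, st.2.2 + 1)
        else (st.1, st.2.1 ++ [i], st.2.2 + 1)
      else st)
    ([], [], 0)
  [s.1, s.2.1]

-- ===== PRECONDITION & SPEC =====
def Spec_distribute_tasks (arr : List Int) (k : Int) (out : List (List Int)) : Prop := out = distribute_tasks_alt arr k
instance (arr : List Int) (k : Int) (out : List (List Int)) : Decidable (Spec_distribute_tasks arr k out) := by unfold Spec_distribute_tasks; infer_instance

-- ===== CLAIM (what is proved, stated in full; the proofs are below) =====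
def Claim_equal_distribute_tasks : Prop := ∀ (arr : List Int) (k : Int), Dom_distribute_tasks arr k → Spec_distribute_tasks arr k (distribute_tasks arr k)

-- ===== LEMMAS AND PROOFS =====

-- A's remaining list is exactly the in-order filter of range(1, k+1).
lemma remaining_eq (arr : List Int) (k : Int) :
    PySem.List.sorted (PySem.Set.diff (PySem.Set.ofList (PySem.List.pyRange 1 (k + 1)))
      (PySem.Set.ofList arr)) (fun x => x) false
    = (PySem.List.pyRange 1 (k + 1)).filter (fun i => !(PySem.Set.contains (PySem.Set.ofList arr) i)) := by
  rw [PySem.Set.ofList_eq_self_of_nodup _ (PySem.List.nodup_pyRange_one 1 (k + 1))]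
  unfold PySem.Set.diff
  exact PySem.List.sorted_eq_self_of_pairwise _ _
    (((PySem.List.pairwise_lt_pyRange_one 1 (k + 1)).filter _).imp le_of_lt)

-- B's counter-driven fold over a list equals A's enumerate-driven fold, for any start index.
lemma counter_eq_enumerate (ys : List Int) : ∀ (n : Int) (t m : List Int),
    ys.foldl (fun (st : List Int × List Int × Int) i =>
        if PySem.Int.mod st.2.2 2 == 0 then (st.1 ++ [i], st.2.1, st.2.2 + 1)
        else (st.1, st.2.1 ++ [i], st.2.2 + 1)) (t, m, n)
    = (((PySem.List.enumerate ys n).foldl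
        (fun (p : List Int × List Int) (it : Int × Int) =>
          if PySem.Int.mod it.1 2 == 0 then (p.1 ++ [it.2], p.2) else (p.1, p.2 ++ [it.2]))
        (t, m)).1,
       ((PySem.List.enumerate ys n).foldl
        (fun (p : List Int × List Int) (it : Int × Int) =>
          if PySem.Int.mod it.1 2 == 0 then (p.1 ++ [it.2], p.2) else (p.1, p.2 ++ [it.2]))
        (t, m)).2,
       n + ys.length) := by
  induction ys with
  | nil => intro n t m; simp [PySem.List.enumerate_nil]
  | cons y ys ih =>
    intro n t m
    rw [PySem.List.enumerate_cons]
    simp only [List.foldl_cons]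
    by_cases h : PySem.Int.mod n 2 == 0 <;>
      simp only [h, if_pos, if_neg, Bool.not_eq_true] <;>
      · rw [ih (n + 1)]
        simp only [List.length_cons, Prod.mk.injEq]
        refine ⟨trivial, trivial, ?_⟩
        push_cast
        ring

-- ===== VERDICT (by name: the statement is the Claim_ definition above) =====
theorem distribute_tasks_spec : Claim_equal_distribute_tasks := by
  intro arr k _
  unfold Spec_distribute_tasks distribute_tasks distribute_tasks_alt
  simp only [remaining_eq arr k]
  rw [PySem.List.foldl_if_eq_foldl_filter
        (fun i => !(PySem.Set.contains (PySem.Set.ofList arr) i)) _ _ (([], [], 0) : List Int × List Int × Int)]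
  rw [counter_eq_enumerate _ 0]
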